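-- pv_equiv track=rewrite | github.com/xemusila/codewars-solutions | two_beggars_and_a_gold_2.py | distribution_of
-- ===== SOURCE A (Python) =====
-- def distribution_of(golds):
--     sums = [0, 0]
--     while golds:
--         i = 0
--         while i < 2 and golds:
--             sums[i] += golds.pop(-(golds[0] < golds[-1]))
--             i += 1
--     return sums
-- ===== SOURCE B (Python) =====
-- # Two-pointer scan from both ends with an alternating beggar index.
-- # Unlike A, does not mutate the input list (A empties golds in place); the return value is identical.
-- def distribution_of(golds):
--     sums = [0, 0]
--     lo, hi, t = 0, len(golds) - 1, 0
--     while lo <= hi: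
--         if golds[lo] < golds[hi]:
--             sums[t] += golds[hi]
--             hi -= 1
--         else:
--             sums[t] += golds[lo]
--             lo += 1
--         t ^= 1
--     return sums
-- ===== Notes on version B (the rewrite author's own statement) =====
-- stated objective: faster
-- what changed: A repeatedly pops an end of the list (pop(0) shifts every remaining element, and pops also mutate the caller's list); B scans the unchanged list once with two index pointers and an alternating beggar index.
import Mathlib
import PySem

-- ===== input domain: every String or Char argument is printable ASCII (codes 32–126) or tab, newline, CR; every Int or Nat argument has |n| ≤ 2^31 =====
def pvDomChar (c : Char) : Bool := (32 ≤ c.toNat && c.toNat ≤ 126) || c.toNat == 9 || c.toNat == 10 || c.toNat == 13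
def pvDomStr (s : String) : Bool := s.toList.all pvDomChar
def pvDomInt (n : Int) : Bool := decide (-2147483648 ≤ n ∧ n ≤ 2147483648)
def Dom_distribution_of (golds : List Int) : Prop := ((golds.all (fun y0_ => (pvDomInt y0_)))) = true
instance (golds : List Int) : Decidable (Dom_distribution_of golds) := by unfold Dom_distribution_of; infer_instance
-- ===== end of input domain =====

-- B replaces A's repeated list.pop (pop(0) shifts the whole list each time) by a two-pointer
-- scan over the unchanged list with an alternating beggar index; A also empties the input list
-- in place while B does not mutate it — the equivalence proved here is about the return value.

-- ===== PORT A =====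
-- golds.pop(-(golds[0] < golds[-1])) on nonempty golds: compare golds[0] with golds[-1];
-- pop(-1) is dropLast, pop(0) is tail (A only performs this on nonempty lists).
def popOnceA (g : List Int) : Int × List Int :=
  let a := (PySem.List.pyGet? g 0).getD 0
  let b := (PySem.List.pyGet? g (-1)).getD 0
  if a < b then (b, g.dropLast) else (a, g.tail)

theorem popOnceA_len (g : List Int) (h : g ≠ []) : (popOnceA g).2.length + 1 = g.length := by
  unfold popOnceA
  cases g with
  | nil => exact absurd rfl h
  | cons a t => dsimp only; split <;> simp

-- while golds: i = 0; while i < 2 and golds: sums[i] += golds.pop(...); i += 1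
def distALoop (g : List Int) (s0 s1 : Int) : Int × Int :=
  if h : g = [] then (s0, s1)
  else
    let p0 := popOnceA g
    if h2 : p0.2 = [] then (s0 + p0.1, s1)
    else
      let p1 := popOnceA p0.2
      distALoop p1.2 (s0 + p0.1) (s1 + p1.1)
termination_by g.length
decreasing_by
  have h1 := popOnceA_len g h
  have h3 := popOnceA_len (popOnceA g).2 h2
  omega

def distribution_of (golds : List Int) : List Int :=
  let s := distALoop golds 0 0
  [s.1, s.2]

-- ===== PORT B =====
-- two pointers lo, hi into the fixed list; t is the current beggar, toggled by t ^= 1.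
def distBLoop (golds : List Int) (lo hi : Int) (t : Nat) (s0 s1 : Int) : Int × Int :=
  if lo ≤ hi then
    let x := (PySem.List.pyGet? golds lo).getD 0
    let y := (PySem.List.pyGet? golds hi).getD 0
    if x < y then
      if t = 0 then distBLoop golds lo (hi - 1) (t ^^^ 1) (s0 + y) s1
      else distBLoop golds lo (hi - 1) (t ^^^ 1) s0 (s1 + y)
    else
      if t = 0 then distBLoop golds (lo + 1) hi (t ^^^ 1) (s0 + x) s1
      else distBLoop golds (lo + 1) hi (t ^^^ 1) s0 (s1 + x)
  else (s0, s1)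
termination_by (hi + 1 - lo).toNat
decreasing_by all_goals omega

def distribution_of_alt (golds : List Int) : List Int :=
  let r := distBLoop golds 0 ((golds.length : Int) - 1) 0 0 0
  [r.1, r.2]

-- ===== PRECONDITION & SPEC =====
def Spec_distribution_of (golds : List Int) (out : List Int) : Prop := out = distribution_of_alt golds
instance (golds : List Int) (out : List Int) : Decidable (Spec_distribution_of golds out) := by unfold Spec_distribution_of; infer_instance

-- ===== CLAIM (what is proved, stated in full; the proofs are below) =====
def Claim_equal_distribution_of : Prop := ∀ (golds : List Int), Dom_distribution_of golds → Spec_distribution_of golds (distribution_of golds)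

-- ===== LEMMAS AND PROOFS =====

-- the slice of L that B's pointers (lo, hi) still cover
def pvSeg (L : List Int) (lo hi : Int) : List Int := (L.drop lo.toNat).take (hi + 1 - lo).toNat

-- proof-only: B's loop re-expressed on the remaining slice (one pop per step, toggling t)
def distBseg (g : List Int) (t : Nat) (s0 s1 : Int) : Int × Int :=
  if h : g = [] then (s0, s1)
  else
    let p := popOnceA g
    if t = 0 then distBseg p.2 1 (s0 + p.1) s1 else distBseg p.2 0 s0 (s1 + p.1)
termination_by g.length
decreasing_by all_goals (have := popOnceA_len g h; omega)

theorem pvSeg_length (L : List Int) (lo hi : Int) (hlo : 0 ≤ lo) (hhi : hi < L.length) :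
    (pvSeg L lo hi).length = (hi + 1 - lo).toNat := by
  unfold pvSeg; simp; omega

theorem pvSeg_get0 (L : List Int) (lo hi : Int) (hlo : 0 ≤ lo) (hle : lo ≤ hi)
    (hhi : hi < L.length) : (pvSeg L lo hi)[0]? = L[lo.toNat]? := by
  unfold pvSeg
  rw [List.getElem?_take_of_lt (by omega), List.getElem?_drop]
  simp

theorem pvSeg_getLast (L : List Int) (lo hi : Int) (hlo : 0 ≤ lo) (hle : lo ≤ hi)
    (hhi : hi < L.length) : (pvSeg L lo hi).getLast? = L[hi.toNat]? := by
  rw [List.getLast?_eq_getElem?, pvSeg_length L lo hi hlo hhi]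
  unfold pvSeg
  rw [List.getElem?_take_of_lt (by omega), List.getElem?_drop]
  congr 1
  omega

theorem pvSeg_tail (L : List Int) (lo hi : Int) (hlo : 0 ≤ lo) :
    (pvSeg L lo hi).tail = pvSeg L (lo + 1) hi := by
  unfold pvSeg
  rw [← List.drop_one, List.drop_take, List.drop_drop]
  have h1 : (lo + 1).toNat = lo.toNat + 1 := by omega
  have h2 : (hi + 1 - (lo + 1)).toNat = (hi + 1 - lo).toNat - 1 := by omega
  rw [h1, h2]

theorem pvSeg_dropLast (L : List Int) (lo hi : Int) (hlo : 0 ≤ lo) (hle : lo ≤ hi)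
    (hhi : hi < L.length) : (pvSeg L lo hi).dropLast = pvSeg L lo (hi - 1) := by
  rw [List.dropLast_eq_take, pvSeg_length L lo hi hlo hhi]
  unfold pvSeg
  rw [List.take_take]
  congr 1
  omega

theorem popOnceA_seg (L : List Int) (lo hi : Int) (hlo : 0 ≤ lo) (hle : lo ≤ hi)
    (hhi : hi < L.length) :
    popOnceA (pvSeg L lo hi) =
      if (PySem.List.pyGet? L lo).getD 0 < (PySem.List.pyGet? L hi).getD 0
      then ((PySem.List.pyGet? L hi).getD 0, pvSeg L lo (hi - 1))
      else ((PySem.List.pyGet? L lo).getD 0, pvSeg L (lo + 1) hi) := by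
  unfold popOnceA
  simp only [PySem.List.pyGet?_zero, PySem.List.pyGet?_neg_one,
      pvSeg_get0 L lo hi hlo hle hhi, pvSeg_getLast L lo hi hlo hle hhi,
      pvSeg_tail L lo hi hlo, pvSeg_dropLast L lo hi hlo hle hhi,
      PySem.List.pyGet?_of_nonneg L hlo, PySem.List.pyGet?_of_nonneg L (le_trans hlo hle)]

theorem pvSeg_ne_nil (L : List Int) (lo hi : Int) (hlo : 0 ≤ lo) (hle : lo ≤ hi)
    (hhi : hi < L.length) : pvSeg L lo hi ≠ [] := by
  have := pvSeg_length L lo hi hlo hhi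
  intro hc
  rw [hc] at this
  simp at this
  omega

theorem BLoop_eq_Bseg (n : Nat) : ∀ (L : List Int) (lo hi : Int) (t : Nat) (s0 s1 : Int),
    0 ≤ lo → hi < L.length → t ≤ 1 → (hi + 1 - lo).toNat = n →
    distBLoop L lo hi t s0 s1 = distBseg (pvSeg L lo hi) t s0 s1 := by
  induction n with
  | zero =>
    intro L lo hi t s0 s1 hlo hhi ht hn
    have hgt : ¬ lo ≤ hi := by omega
    rw [distBLoop, if_neg hgt, distBseg]
    have : pvSeg L lo hi = [] := by
      unfold pvSeg
      have : (hi + 1 - lo).toNat = 0 := hn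
      rw [this]; simp
    rw [dif_pos this]
  | succ m ih =>
    intro L lo hi t s0 s1 hlo hhi ht hn
    have hle : lo ≤ hi := by omega
    have hne := pvSeg_ne_nil L lo hi hlo hle hhi
    rw [distBLoop, if_pos hle, distBseg, dif_neg hne]
    simp only [popOnceA_seg L lo hi hlo hle hhi]
    by_cases hxy : (PySem.List.pyGet? L lo).getD 0 < (PySem.List.pyGet? L hi).getD 0
    · rw [if_pos hxy, if_pos hxy]
      by_cases ht0 : t = 0
      · rw [if_pos ht0, if_pos ht0]
        subst ht0
        exact ih L lo (hi - 1) 1 _ _ hlo (by omega) (by omega) (by omega)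
      · rw [if_neg ht0, if_neg ht0]
        have ht1 : t = 1 := by omega
        subst ht1
        exact ih L lo (hi - 1) 0 _ _ hlo (by omega) (by omega) (by omega)
    · rw [if_neg hxy, if_neg hxy]
      by_cases ht0 : t = 0
      · rw [if_pos ht0, if_pos ht0]
        subst ht0
        exact ih L (lo + 1) hi 1 _ _ (by omega) hhi (by omega) (by omega)
      · rw [if_neg ht0, if_neg ht0]
        have ht1 : t = 1 := by omega
        subst ht1
        exact ih L (lo + 1) hi 0 _ _ (by omega) hhi (by omega) (by omega)

theorem Bseg_eq_ALoop (n : Nat) : ∀ (g : List Int) (s0 s1 : Int), g.length = n →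
    distBseg g 0 s0 s1 = distALoop g s0 s1 := by
  induction n using Nat.strong_induction_on with
  | _ n ih =>
    intro g s0 s1 hn
    by_cases hg : g = []
    · rw [distBseg, distALoop.eq_def]
      simp only [dif_pos hg]
    · rw [distBseg, distALoop.eq_def]
      simp only [dif_neg hg]
      have hlen0 := popOnceA_len g hg
      by_cases h2 : (popOnceA g).2 = []
      · rw [distBseg]
        simp [dif_pos h2]
      · rw [distBseg]
        simp only [dif_neg h2, if_neg (one_ne_zero)]
        have hlen1 := popOnceA_len _ h2
        exact ih _ (by omega) _ _ _ rfl

theorem pvSeg_full (L : List Int) : pvSeg L 0 ((L.length : Int) - 1) = L := by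
  unfold pvSeg
  simp

-- ===== VERDICT (by name: the statement is the Claim_ definition above) =====
theorem distribution_of_spec : Claim_equal_distribution_of := by
  intro golds _
  unfold Spec_distribution_of distribution_of distribution_of_alt
  rw [BLoop_eq_Bseg ((((golds.length : Int) - 1) + 1 - 0).toNat) golds 0
        ((golds.length : Int) - 1) 0 0 0 (by omega) (by omega) (by omega) rfl,
      pvSeg_full]
  rw [Bseg_eq_ALoop golds.length golds 0 0 rfl]
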